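-- pv_equiv track=rewrite | github.com/jasonyu0100/General-Programs | 2019 Programs/word_conversion/word_conversion.py | getRemovalWordCombinations
-- ===== SOURCE A (Python) =====
-- def getRemovalWordCombinations(word,goal_word_length):
--   if len(word) == goal_word_length:
--     return [word]
--   all_words = []
--   for index in range(len(word)):
--     if index+1 == len(word): adjusted_word = word[:index]
--     else: adjusted_word = word[:index] + word[index+1:]
--     words = getRemovalWordCombinations(adjusted_word,goal_word_length)
--     all_words += words
--   return set(all_words)
-- ===== SOURCE B (Python) =====
-- def getRemovalWordCombinations(word, goal_word_length):
--     # iterative evaluation with an explicit stack of frames [w, next_index, accumulated_words]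
--     stack = [[word, 0, []]]
--     ret = None
--     while stack:
--         top = stack[-1]
--         w, i, acc = top
--         if len(w) == goal_word_length:
--             ret = [w]
--             stack.pop()
--             continue
--         if i > 0:
--             acc.extend(ret)
--         if i == len(w):
--             ret = set(acc)
--             stack.pop()
--             continue
--         top[1] = i + 1
--         stack.append([w[:i] + w[i+1:], 0, []])
--     return ret
-- ===== Notes on version B (the rewrite author's own statement) =====
-- stated objective: alternative
-- what changed: A's self-recursive function is replaced by an iterative evaluator: one while loop over an explicit stack of frames (word, next index, accumulator) with an explicit return-value register, instead of the call-stack recursion.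
import Mathlib
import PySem

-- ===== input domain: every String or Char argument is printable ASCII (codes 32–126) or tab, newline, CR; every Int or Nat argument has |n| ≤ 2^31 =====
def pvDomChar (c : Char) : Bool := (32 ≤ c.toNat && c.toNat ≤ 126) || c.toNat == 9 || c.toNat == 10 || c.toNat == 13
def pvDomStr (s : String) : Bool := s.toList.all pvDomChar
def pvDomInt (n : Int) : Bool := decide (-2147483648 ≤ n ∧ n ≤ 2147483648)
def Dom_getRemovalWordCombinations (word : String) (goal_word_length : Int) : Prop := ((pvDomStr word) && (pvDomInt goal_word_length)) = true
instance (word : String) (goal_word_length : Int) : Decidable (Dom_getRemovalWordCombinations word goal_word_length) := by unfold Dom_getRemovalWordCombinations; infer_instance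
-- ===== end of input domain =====

-- B replaces A's recursion by an iterative evaluator: an explicit stack of frames
-- (word, next index, accumulator) driven by one while loop; objective: alternative
-- decomposition (recursion -> explicit stack machine), same exact result.

-- Python '+' on strings (exact: code-point concatenation)
def pvCat (a b : String) : String := String.ofList (a.toList ++ b.toList)

-- w[:i] + w[i+1:]  (shared helper of both ports)
def pvRemoveAt (w : String) (i : Int) : String :=
  pvCat (PySem.Str.slice w none (some i)) (PySem.Str.slice w (some (i + 1)) none)

theorem pvRemoveAt_toList (w : String) (i : Int) (h0 : 0 ≤ i) :
    (pvRemoveAt w i).toList = w.toList.take i.toNat ++ w.toList.drop (i + 1).toNat := by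
  simp [pvRemoveAt, pvCat, PySem.Str.toList_slice, PySem.Chars.slice_eq_listSlice,
    PySem.List.slice_to w.toList h0, PySem.List.slice_from w.toList (by omega : (0:Int) ≤ i + 1)]

theorem pvRemoveAt_length (w : String) (i : Int) (h0 : 0 ≤ i)
    (h1 : i < (w.toList.length : Int)) :
    (pvRemoveAt w i).toList.length = w.toList.length - 1 := by
  have := pvRemoveAt_toList w i h0
  have hlen : (pvRemoveAt w i).toList.length
      = min i.toNat w.toList.length + (w.toList.length - (i + 1).toNat) := by
    rw [this]; simp
  omega

-- ===== PORT A =====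
def getRemovalWordCombinations (word : String) (goal_word_length : Int) : List String :=
  if PySem.Str.len word = goal_word_length then [word]
  else
    PySem.Set.ofList
      ((PySem.List.pyRange 0 (PySem.Str.len word) 1).attach.foldl
        (fun all_words index =>
          let adjusted_word :=
            if index.val + 1 = PySem.Str.len word then
              PySem.Str.slice word none (some index.val)
            else
              pvRemoveAt word index.val
          all_words ++ getRemovalWordCombinations adjusted_word goal_word_length)
        [])
termination_by word.toList.length
decreasing_by
  have hmem : 0 ≤ index.val ∧ index.val < (word.toList.length : Int) := by
    have h := (PySem.List.mem_pyRange_one).mp index.property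
    simpa [PySem.Str.len_eq] using h
  split
  · have : (PySem.Str.slice word none (some index.val)).toList
        = word.toList.take index.val.toNat := by
      simp [PySem.Str.toList_slice, PySem.Chars.slice_eq_listSlice,
        PySem.List.slice_to word.toList hmem.1]
    simp only [this, List.length_take]
    omega
  · have := pvRemoveAt_length word index.val hmem.1 hmem.2
    omega

-- termination helpers for the frame machine (cited in decreasing_by)
def pvU : Nat → Nat
  | 0 => 1
  | n + 1 => (n + 2) + (n + 1) * pvU n

theorem pvU_wt (m : Nat) : m * (1 + pvU (m - 1)) + 1 = pvU m := by
  cases m with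
  | zero => simp [pvU]
  | succ k =>
    simp only [Nat.add_sub_cancel, pvU]
    ring

def pvFrameWt (f : String × Nat × List String) : Nat :=
  (f.1.toList.length - f.2.1) * (1 + pvU (f.1.toList.length - 1)) + 1

-- while stack: … — one frame per active call: (w, next index i, accumulator acc);
-- ret starts as [] standing for Python's None, which is never read before assignment
def pvMachine (goal : Int) (stack : List (String × Nat × List String))
    (ret : List String) : List String :=
  match stack with
  | [] => ret
  | (w, i, acc) :: rest =>
    if PySem.Str.len w = goal then
      pvMachine goal rest [w]
    else
      let acc' := if 0 < i then acc ++ ret else acc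
      -- Python tests i == len(w); i only ever counts up from 0 to len(w), so ≤ is the same test
      if w.toList.length ≤ i then
        pvMachine goal rest (PySem.Set.ofList acc')
      else
        pvMachine goal ((pvRemoveAt w (i : Int), 0, []) :: (w, i + 1, acc') :: rest) ret
termination_by (stack.map pvFrameWt).sum
decreasing_by
  · simp only [List.map_cons, List.sum_cons]
    have h1 : 0 < pvFrameWt (w, i, acc) := Nat.succ_pos _
    omega
  · simp only [List.map_cons, List.sum_cons]
    have h1 : 0 < pvFrameWt (w, i, acc) := Nat.succ_pos _
    omega
  · next hle =>
    simp only [List.map_cons, List.sum_cons]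
    have hi : i < w.toList.length := by omega
    have hchild : (pvRemoveAt w (i : Int)).toList.length = w.toList.length - 1 :=
      pvRemoveAt_length w (i : Int) (Int.natCast_nonneg i) (by exact_mod_cast hi)
    simp only [pvFrameWt, hchild, Nat.sub_zero]
    rw [pvU_wt]
    have hsplit : (w.toList.length - i) * (1 + pvU (w.toList.length - 1))
        = (w.toList.length - (i + 1)) * (1 + pvU (w.toList.length - 1))
          + (1 + pvU (w.toList.length - 1)) := by
      have h2 : w.toList.length - i = (w.toList.length - (i + 1)) + 1 := by omega
      rw [h2, Nat.add_mul, Nat.one_mul]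
    omega

-- ===== PORT B =====
def getRemovalWordCombinations_alt (word : String) (goal_word_length : Int) : List String :=
  pvMachine goal_word_length [(word, 0, [])] []

-- ===== PRECONDITION & SPEC =====
def Spec_getRemovalWordCombinations (word : String) (goal_word_length : Int) (out : List String) : Prop := out = getRemovalWordCombinations_alt word goal_word_length
instance (word : String) (goal_word_length : Int) (out : List String) : Decidable (Spec_getRemovalWordCombinations word goal_word_length out) := by unfold Spec_getRemovalWordCombinations; infer_instance

-- ===== CLAIM (what is proved, stated in full; the proofs are below) =====
def Claim_equal_getRemovalWordCombinations : Prop := ∀ (word : String) (goal_word_length : Int), Dom_getRemovalWordCombinations word goal_word_length → Spec_getRemovalWordCombinations word goal_word_length (getRemovalWordCombinations word goal_word_length)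

-- ===== LEMMAS AND PROOFS =====

-- the raw leaf enumeration both programs traverse (proof-only)
def pvLeaves (word : String) (goal : Int) : List String :=
  if PySem.Str.len word = goal then [word]
  else (List.range word.toList.length).attach.flatMap
        (fun i => pvLeaves (pvRemoveAt word (i.val : Int)) goal)
termination_by word.toList.length
decreasing_by
  have hk := List.mem_range.mp i.property
  have := pvRemoveAt_length word (i.val : Int) (by omega) (by exact_mod_cast hk)
  omega

theorem pvLeaves_guard (w : String) (g : Int) (h : PySem.Str.len w = g) :
    pvLeaves w g = [w] := by
  rw [pvLeaves, if_pos h]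

theorem pvFlatMap_attach {α β : Type} (l : List α) (F : α → List β) :
    l.attach.flatMap (fun i => F i.val) = l.flatMap F := by
  conv_rhs => rw [← List.attach_map_subtype_val l]
  rw [List.flatMap_map]

theorem pvLeaves_else (w : String) (g : Int) (h : ¬ PySem.Str.len w = g) :
    pvLeaves w g
      = (List.range w.toList.length).flatMap (fun k : Nat => pvLeaves (pvRemoveAt w ((k : Nat) : Int)) g) := by
  rw [pvLeaves, if_neg h]
  exact pvFlatMap_attach (List.range w.toList.length)
    (fun k : Nat => pvLeaves (pvRemoveAt w (k : Int)) g)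

theorem pvUpdate_congr {α : Type} [BEq α] [LawfulBEq α] (s : PySem.Set α) (x y : List α)
    (h : PySem.Set.ofList x = PySem.Set.ofList y) :
    PySem.Set.update s x = PySem.Set.update s y := by
  rw [PySem.Set.update_eq_append_filter, PySem.Set.update_eq_append_filter, h]

theorem pvUpdate_flatMap_congr {α β : Type} [BEq β] [LawfulBEq β] (l : List α)
    (f g : α → List β) (h : ∀ a ∈ l, PySem.Set.ofList (f a) = PySem.Set.ofList (g a)) :
    ∀ s : PySem.Set β, PySem.Set.update s (l.flatMap f) = PySem.Set.update s (l.flatMap g) := by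
  induction l with
  | nil => intro s; simp
  | cons a t ih =>
    intro s
    simp only [List.flatMap_cons, PySem.Set.update_append]
    rw [pvUpdate_congr s (f a) (g a) (h a (by simp))]
    exact ih (fun b hb => h b (by simp [hb])) _

theorem pvOfList_flatMap_congr {α β : Type} [BEq β] [LawfulBEq β] (l : List α)
    (f g : α → List β) (h : ∀ a ∈ l, PySem.Set.ofList (f a) = PySem.Set.ofList (g a)) :
    PySem.Set.ofList (l.flatMap f) = PySem.Set.ofList (l.flatMap g) := by
  rw [← PySem.Set.update_nil_left, ← PySem.Set.update_nil_left]
  exact pvUpdate_flatMap_congr l f g h []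

-- A's branch on the last index produces the same string as w[:i] + w[i+1:]
theorem pvAdj_eq (w : String) (k : Nat) :
    (if (k : Int) + 1 = PySem.Str.len w then PySem.Str.slice w none (some (k : Int))
     else pvRemoveAt w (k : Int)) = pvRemoveAt w (k : Int) := by
  split
  · next hEnd =>
    apply String.toList_inj.mp
    rw [pvRemoveAt_toList w (k : Int) (by omega)]
    have hdrop : ((k : Int) + 1).toNat = w.toList.length := by
      rw [PySem.Str.len_eq] at hEnd; omega
    rw [hdrop, List.drop_length, List.append_nil]
    simp [PySem.Str.toList_slice, PySem.Chars.slice_eq_listSlice,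
      PySem.List.slice_to w.toList (by omega : (0:Int) ≤ (k : Int))]
  · rfl

-- A computes exactly set(leaf enumeration) below the top level
theorem pvA_char (w : String) (g : Int) :
    getRemovalWordCombinations w g
      = if PySem.Str.len w = g then [w] else PySem.Set.ofList (pvLeaves w g) := by
  induction hn : w.toList.length using Nat.strong_induction_on generalizing w with
  | _ n IH =>
  by_cases hg : PySem.Str.len w = g
  · rw [getRemovalWordCombinations, if_pos hg, if_pos hg]
  · rw [getRemovalWordCombinations, if_neg hg, if_neg hg]
    simp only [PySem.List.foldl_append_eq_flatMap, List.nil_append]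
    rw [pvFlatMap_attach _ (fun i : Int =>
      getRemovalWordCombinations
        (if i + 1 = PySem.Str.len w then PySem.Str.slice w none (some i)
         else pvRemoveAt w i) g)]
    rw [PySem.List.pyRange_one]
    have hlen0 : ((PySem.Str.len w - 0).toNat) = n := by
      rw [PySem.Str.len_eq]; omega
    rw [hlen0, List.flatMap_map]
    have hstep : ∀ k ∈ List.range n,
        (getRemovalWordCombinations
          (if (0 : Int) + (k : Int) + 1 = PySem.Str.len w then
              PySem.Str.slice w none (some ((0 : Int) + (k : Int)))
            else pvRemoveAt w ((0 : Int) + (k : Int))) g)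
          = getRemovalWordCombinations (pvRemoveAt w (k : Int)) g := by
      intro k hk
      rw [List.mem_range] at hk
      have := pvAdj_eq w k
      simp only [zero_add]
      rw [this]
    rw [List.flatMap_def, List.map_congr_left hstep, ← List.flatMap_def]
    rw [pvLeaves_else w g hg, hn]
    apply pvOfList_flatMap_congr
    intro k hk
    rw [List.mem_range] at hk
    have hc : (pvRemoveAt w (k : Int)).toList.length = n - 1 := by
      rw [← hn]
      exact pvRemoveAt_length w (k : Int) (by omega) (by rw [hn]; exact_mod_cast hk)
    rw [IH (n - 1) (by omega) _ hc]
    by_cases hg2 : PySem.Str.len (pvRemoveAt w (k : Int)) = g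
    · rw [if_pos hg2, pvLeaves_guard _ _ hg2]
    · rw [if_neg hg2, PySem.Set.ofList_ofList]

-- the value A's recursion returns for w (list at the guard, set of leaves otherwise)
def pvVal (w : String) (g : Int) : List String :=
  if PySem.Str.len w = g then [w] else PySem.Set.ofList (pvLeaves w g)

-- running one fresh frame on top of the machine computes A's value for that word
theorem pvMachine_frame (g : Int) (w : String) (rest : List (String × Nat × List String))
    (ret : List String) :
    pvMachine g ((w, 0, []) :: rest) ret = pvMachine g rest (pvVal w g) := by
  induction hn : w.toList.length using Nat.strong_induction_on generalizing w rest ret with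
  | _ n IH =>
  by_cases hg : PySem.Str.len w = g
  · rw [pvMachine, if_pos hg, pvVal, if_pos hg]
  · have inner : ∀ (j i : Nat) (acc ret : List String)
        (rest : List (String × Nat × List String)), i + j = n →
        pvMachine g ((w, i, acc) :: rest) ret
          = pvMachine g rest (PySem.Set.ofList
              ((acc ++ if 0 < i then ret else [])
                ++ (List.range' i j).flatMap
                    (fun k : Nat => pvVal (pvRemoveAt w ((k : Nat) : Int)) g))) := by
      intro j
      induction j with
      | zero =>
        intro i acc ret rest hij
        rw [pvMachine, if_neg hg]
        have hin : w.toList.length ≤ i := by omega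
        rw [if_pos hin]
        by_cases hi : 0 < i <;> simp [hi]
      | succ j ihj =>
        intro i acc ret rest hij
        have hi_lt : i < w.toList.length := by omega
        rw [pvMachine, if_neg hg]
        rw [if_neg (by omega : ¬ w.toList.length ≤ i)]
        have hchild : (pvRemoveAt w (i : Int)).toList.length = n - 1 := by
          rw [← hn]
          exact pvRemoveAt_length w (i : Int) (Int.natCast_nonneg i) (by exact_mod_cast hi_lt)
        rw [IH (n - 1) (by omega) _ _ _ hchild]
        rw [ihj (i + 1) _ _ _ (by omega)]
        simp only [Nat.zero_lt_succ, if_pos, List.range'_succ, List.flatMap_cons]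
        by_cases hi : 0 < i <;> simp [hi, List.append_assoc]
    rw [inner n 0 [] ret rest (by simp)]
    simp only [Nat.lt_irrefl, if_false, List.nil_append, ← hn, ← List.range_eq_range']
    rw [pvVal, if_neg hg, pvLeaves_else w g hg]
    congr 1
    apply pvOfList_flatMap_congr
    intro k _
    rw [pvVal]
    by_cases hg2 : PySem.Str.len (pvRemoveAt w (k : Int)) = g
    · rw [if_pos hg2, pvLeaves_guard _ _ hg2]
    · rw [if_neg hg2, PySem.Set.ofList_ofList]

-- ===== VERDICT (by name: the statement is the Claim_ definition above) =====
theorem getRemovalWordCombinations_spec : Claim_equal_getRemovalWordCombinations := by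
  intro word g _
  unfold Spec_getRemovalWordCombinations getRemovalWordCombinations_alt
  rw [pvMachine_frame, pvMachine, pvA_char, pvVal]
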